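-- pv_equiv track=rewrite | github.com/josephf8503/nulla-hive-mind | core/nullabook_identity.py | _index_to_suffix
-- ===== SOURCE A (Python) =====
-- _HANDLE_ALPHABET = "abcdefghijklmnopqrstuvwxyz0123456789"
--
-- _BASE = len(_HANDLE_ALPHABET)
--
-- def _index_to_suffix(n: int) -> str:
--     """Convert a zero-based integer to a base-36 suffix (a, b, ..., z, 0, ..., 9, aa, ab, ...)."""
--     if n < 0:
--         return "a"
--     width = 1
--     capacity = _BASE
--     remaining = n
--     while remaining >= capacity:
--         remaining -= capacity
--         width += 1
--         capacity = _BASE ** width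
--     chars = []
--     for _ in range(width):
--         chars.append(_HANDLE_ALPHABET[remaining % _BASE])
--         remaining //= _BASE
--     return "".join(reversed(chars))
-- ===== SOURCE B (Python) =====
-- _HANDLE_ALPHABET = "abcdefghijklmnopqrstuvwxyz0123456789"
--
-- _BASE = len(_HANDLE_ALPHABET)
--
-- def _index_to_suffix(n: int) -> str:
--     """Convert a zero-based integer to a base-36 suffix (a, b, ..., z, 0, ..., 9, aa, ab, ...)."""
--     if n < 0:
--         return "a"
--     m = n + 1
--     chars = []
--     while m > 0:
--         m, r = divmod(m - 1, _BASE)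
--         chars.append(_HANDLE_ALPHABET[r])
--     return "".join(reversed(chars))
-- ===== Notes on version B (the rewrite author's own statement) =====
-- stated objective: simpler
-- what changed: Replaces A's two sequential loops (width search by subtracting growing powers of 36, then fixed-width digit extraction) with one bijective-base-36 loop 'm, r = divmod(m - 1, 36)' on m = n + 1.
import Mathlib
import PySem

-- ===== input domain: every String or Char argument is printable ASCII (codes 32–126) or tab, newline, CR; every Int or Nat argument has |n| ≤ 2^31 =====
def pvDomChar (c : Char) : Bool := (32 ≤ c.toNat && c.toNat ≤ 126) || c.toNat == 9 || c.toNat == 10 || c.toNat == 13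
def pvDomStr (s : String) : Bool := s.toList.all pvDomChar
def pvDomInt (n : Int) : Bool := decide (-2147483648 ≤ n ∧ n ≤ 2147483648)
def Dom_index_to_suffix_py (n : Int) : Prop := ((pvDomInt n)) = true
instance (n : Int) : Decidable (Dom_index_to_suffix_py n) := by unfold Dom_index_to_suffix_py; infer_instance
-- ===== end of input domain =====

-- B replaces A's two loops (width search, then digit extraction) with the standard
-- single bijective-base-36 loop on n+1; equivalence is proved for every Int (no Pre_).

-- shared module constant (_HANDLE_ALPHABET in Python)
def pvAlphabet : String := "abcdefghijklmnopqrstuvwxyz0123456789"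

-- _HANDLE_ALPHABET[i]; in both programs i is always 0..35, so the index is in range
def pvDigit (i : Int) : Char := (PySem.Str.pyGet? pvAlphabet i).getD 'a'

-- ===== PORT A =====
-- the 'while remaining >= capacity' loop; capacity is 36 ** width at every entry
def pvWidthLoop (remaining : Int) (width : Nat) : Int × Nat :=
  if (36 : Int) ^ width ≤ remaining then
    pvWidthLoop (remaining - (36 : Int) ^ width) (width + 1)
  else
    (remaining, width)
  termination_by remaining.toNat
  decreasing_by
    have h1 : (1 : Int) ≤ (36 : Int) ^ width := one_le_pow₀ (by norm_num)
    omega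

-- the 'for _ in range(width)' loop appending to chars
def pvDigitLoop (width : Nat) (remaining : Int) (chars : List Char) : List Char :=
  match width with
  | 0 => chars
  | w + 1 =>
    pvDigitLoop w (PySem.Int.floordiv remaining 36)
      (chars ++ [pvDigit (PySem.Int.mod remaining 36)])

def index_to_suffix_py (n : Int) : String :=
  if n < 0 then "a"
  else
    String.mk (pvDigitLoop (pvWidthLoop n 1).2 (pvWidthLoop n 1).1 []).reverse

-- ===== PORT B =====
-- the 'while m > 0: m, r = divmod(m - 1, 36)' loop
def pvBLoop (m : Int) (chars : List Char) : List Char :=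
  if 0 < m then
    pvBLoop (PySem.Int.floordiv (m - 1) 36)
      (chars ++ [pvDigit (PySem.Int.mod (m - 1) 36)])
  else chars
  termination_by m.toNat
  decreasing_by
    have h1 : PySem.Int.floordiv (m - 1) 36 = (m - 1) / 36 :=
      PySem.Int.floordiv_eq_ediv_of_pos (by norm_num)
    have h2 : (m - 1) / 36 < m := by
      have := Int.ediv_le_self (m - 1) (by omega : (0:Int) ≤ m - 1)
      omega
    omega

def index_to_suffix_py_alt (n : Int) : String :=
  if n < 0 then "a"
  else String.mk (pvBLoop (n + 1) []).reverse

-- ===== PRECONDITION & SPEC =====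
def Spec_index_to_suffix_py (n : Int) (out : String) : Prop := out = index_to_suffix_py_alt n
instance (n : Int) (out : String) : Decidable (Spec_index_to_suffix_py n out) := by unfold Spec_index_to_suffix_py; infer_instance

-- ===== CLAIM (what is proved, stated in full; the proofs are below) =====
def Claim_equal_index_to_suffix_py : Prop := ∀ (n : Int), Dom_index_to_suffix_py n → Spec_index_to_suffix_py n (index_to_suffix_py n)

-- ===== LEMMAS AND PROOFS =====

-- reference: bijective base-36 digit list of m (most significant first)
def pvRep (m : Nat) : List Char :=
  if m = 0 then []
  else pvRep ((m - 1) / 36) ++ [pvDigit (((m - 1) % 36 : Nat) : Int)]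
  termination_by m
  decreasing_by
    have : (m - 1) / 36 ≤ m - 1 := Nat.div_le_self _ _
    omega

-- plain base-36 digit list of r, exactly w digits, most significant first
def pvRep' (w : Nat) (r : Int) : List Char :=
  match w with
  | 0 => []
  | w + 1 => pvRep' w (PySem.Int.floordiv r 36) ++ [pvDigit (PySem.Int.mod r 36)]

-- S w = 1 + 36 + … + 36^(w-1)
def pvS : Nat → Nat
  | 0 => 0
  | w + 1 => 36 * pvS w + 1

theorem pvS_closed (w : Nat) : 35 * pvS w + 1 = 36 ^ w := by
  induction w with
  | zero => rfl
  | succ w ih => simp only [pvS, pow_succ]; omega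

theorem pvS_succ' (w : Nat) : pvS (w + 1) = pvS w + 36 ^ w := by
  have h := pvS_closed w
  simp only [pvS]
  omega

theorem pvPow36_toNat (w : Nat) : ((36 : Int) ^ w).toNat = 36 ^ w := by
  have h : ((36 : Int) ^ w) = ((36 ^ w : Nat) : Int) := by push_cast; ring
  rw [h, Int.toNat_natCast]

theorem pvBLoop_eq_rep (m : Int) (acc : List Char) (hm : 0 ≤ m) :
    pvBLoop m acc = acc ++ (pvRep m.toNat).reverse := by
  induction m, acc using pvBLoop.induct with
  | case1 m acc hpos ih =>
    rw [pvBLoop, if_pos hpos, ih (by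
      rw [PySem.Int.floordiv_eq_ediv_of_pos (by norm_num)]
      exact Int.ediv_nonneg (by omega) (by norm_num))]
    have hfd : PySem.Int.floordiv (m - 1) 36 = (((m.toNat - 1) / 36 : Nat) : Int) := by
      have : (m - 1 : Int) = ((m.toNat - 1 : Nat) : Int) := by omega
      rw [this]; exact_mod_cast PySem.Int.floordiv_natCast (m.toNat - 1) 36
    have hmd : PySem.Int.mod (m - 1) 36 = (((m.toNat - 1) % 36 : Nat) : Int) := by
      have : (m - 1 : Int) = ((m.toNat - 1 : Nat) : Int) := by omega
      rw [this]; exact_mod_cast PySem.Int.mod_natCast (m.toNat - 1) 36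
    rw [hfd, hmd, Int.toNat_natCast]
    conv_rhs => rw [pvRep]
    rw [if_neg (by omega)]
    simp
  | case2 m acc hpos =>
    rw [pvBLoop, if_neg hpos]
    have : m.toNat = 0 := by omega
    rw [this, pvRep]
    simp

theorem pvDigitLoop_eq_rep' (w : Nat) (r : Int) (acc : List Char) :
    pvDigitLoop w r acc = acc ++ (pvRep' w r).reverse := by
  induction w generalizing r acc with
  | zero => simp [pvDigitLoop, pvRep']
  | succ w ih => simp [pvDigitLoop, pvRep', ih]

-- the width loop preserves r + S w and ends with 0 ≤ r < 36^w
theorem pvWidthLoop_spec (r : Int) (w : Nat) (hr : 0 ≤ r) :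
    0 ≤ (pvWidthLoop r w).1 ∧ (pvWidthLoop r w).1 < (36 : Int) ^ (pvWidthLoop r w).2 ∧
      (pvWidthLoop r w).1.toNat + pvS (pvWidthLoop r w).2 = r.toNat + pvS w := by
  induction r, w using pvWidthLoop.induct with
  | case1 r w hle ih =>
    rw [pvWidthLoop, if_pos hle]
    have h1 : (1 : Int) ≤ (36 : Int) ^ w := one_le_pow₀ (by norm_num)
    obtain ⟨ha, hb, hc⟩ := ih (by omega)
    refine ⟨ha, hb, ?_⟩
    rw [hc, pvS_succ']
    have hcast := pvPow36_toNat w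
    omega
  | case2 r w hlt =>
    rw [pvWidthLoop, if_neg hlt]
    exact ⟨hr, not_le.mp hlt, rfl⟩

theorem pvRep'_eq_rep (w : Nat) (r : Int) (hr : 0 ≤ r) (hlt : r < (36 : Int) ^ w) :
    pvRep' w r = pvRep (r.toNat + pvS w) := by
  induction w generalizing r with
  | zero =>
    have : r = 0 := by omega
    simp [pvRep', pvRep, pvS, this]
  | succ w ih =>
    have hfd : PySem.Int.floordiv r 36 = ((r.toNat / 36 : Nat) : Int) := by
      have : r = ((r.toNat : Nat) : Int) := by omega
      rw [this]; exact_mod_cast PySem.Int.floordiv_natCast r.toNat 36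
    have hmd : PySem.Int.mod r 36 = ((r.toNat % 36 : Nat) : Int) := by
      have : r = ((r.toNat : Nat) : Int) := by omega
      rw [this]; exact_mod_cast PySem.Int.mod_natCast r.toNat 36
    have hlt' : r.toNat < 36 ^ (w + 1) := by
      have hcast := pvPow36_toNat (w+1)
      omega
    have hdivlt : ((r.toNat / 36 : Nat) : Int) < (36 : Int) ^ w := by
      have : r.toNat / 36 < 36 ^ w := by
        rw [Nat.div_lt_iff_lt_mul (by norm_num)]
        calc r.toNat < 36 ^ (w + 1) := hlt'
          _ = 36 ^ w * 36 := by ring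
      exact_mod_cast this
    have hS : pvS (w + 1) = 36 * pvS w + 1 := rfl
    rw [pvRep', hfd, hmd, ih _ (by positivity) hdivlt, Int.toNat_natCast]
    conv_rhs => rw [pvRep]
    rw [if_neg (by omega)]
    have h1 : (r.toNat + pvS (w + 1) - 1) = r.toNat + 36 * pvS w := by omega
    rw [h1]
    have h2 : (r.toNat + 36 * pvS w) / 36 = r.toNat / 36 + pvS w := by
      omega
    have h3 : (r.toNat + 36 * pvS w) % 36 = r.toNat % 36 := by
      omega
    rw [h2, h3]

-- ===== VERDICT (by name: the statement is the Claim_ definition above) =====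
theorem index_to_suffix_py_spec : Claim_equal_index_to_suffix_py := by
  intro n _
  unfold Spec_index_to_suffix_py index_to_suffix_py index_to_suffix_py_alt
  by_cases hn : n < 0
  · rw [if_pos hn, if_pos hn]
  · rw [if_neg hn, if_neg hn]
    have hn0 : 0 ≤ n := by omega
    obtain ⟨ha, hb, hc⟩ := pvWidthLoop_spec n 1 hn0
    rw [pvDigitLoop_eq_rep', pvRep'_eq_rep _ _ ha hb, hc,
      pvBLoop_eq_rep _ _ (by omega)]
    have hS : pvS 1 = 1 := rfl
    have : (n + 1).toNat = n.toNat + pvS 1 := by omega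
    rw [this]
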